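-- pv_equiv track=rewrite | github.com/AmiltonCabral/programacao-1 | Unidade 08/Miniteste/unicos-em-comum/solucao.py | unicos_em_comum
-- ===== SOURCE A (Python) =====
-- def unicos_em_comum(seq1, seq2):
--     comuns_seq1 = []
--     for i in seq1:
--         comum = 0
--         for j in seq1:
--             if i == j:
--                 comum += 1
--         if comum == 1:
--             comuns_seq1.append(i)
--     comuns_seq2 = []
--     for i in seq2:
--         comum = 0
--         for j in seq2:
--             if i == j:
--                 comum += 1
--         if comum == 1:
--             comuns_seq2.append(i)
--     resultado = []
--     for i in comuns_seq1:
--         for j in comuns_seq2: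
--             if i == j:
--                 resultado.append(i)
--     return resultado
--
-- seq1 = ['A', 'B', 'A', 'B']
--
-- seq2 = ['C', 'C']
-- ===== SOURCE B (Python) =====
-- from collections import Counter
--
-- def unicos_em_comum(seq1, seq2):
--     c1 = Counter(seq1)
--     c2 = Counter(seq2)
--     return [x for x in seq1 if c1[x] == 1 and c2[x] == 1]
-- ===== Notes on version B (the rewrite author's own statement) =====
-- stated objective: faster
-- what changed: Replaces A's three quadratic phases (self-count filter of seq1, self-count filter of seq2, nested-loop intersection) with two Counter tables built once and a single pass over seq1 emitting x when both counts are 1.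
import Mathlib
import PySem

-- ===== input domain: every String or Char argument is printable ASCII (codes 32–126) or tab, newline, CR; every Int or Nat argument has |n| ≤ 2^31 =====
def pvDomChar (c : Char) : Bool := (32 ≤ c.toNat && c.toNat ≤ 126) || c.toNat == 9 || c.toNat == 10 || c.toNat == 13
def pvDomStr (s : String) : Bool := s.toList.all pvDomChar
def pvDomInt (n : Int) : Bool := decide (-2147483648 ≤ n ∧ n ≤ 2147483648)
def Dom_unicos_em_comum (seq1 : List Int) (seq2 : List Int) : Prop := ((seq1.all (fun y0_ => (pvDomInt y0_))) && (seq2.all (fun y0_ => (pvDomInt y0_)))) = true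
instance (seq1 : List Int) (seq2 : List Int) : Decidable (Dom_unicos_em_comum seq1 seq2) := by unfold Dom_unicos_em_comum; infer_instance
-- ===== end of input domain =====

-- B replaces A's three quadratic phases with count tables built once plus one pass over seq1 (asymptotically faster).


-- ===== PORT A =====
def unicos_em_comum (seq1 : List Int) (seq2 : List Int) : List Int :=
  let comuns_seq1 := seq1.foldl (fun acc i =>
    let comum := seq1.foldl (fun c j => if i == j then c + 1 else c) (0 : Nat)
    if comum == 1 then acc ++ [i] else acc) []
  let comuns_seq2 := seq2.foldl (fun acc i =>
    let comum := seq2.foldl (fun c j => if i == j then c + 1 else c) (0 : Nat)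
    if comum == 1 then acc ++ [i] else acc) []
  comuns_seq1.foldl (fun acc i =>
    comuns_seq2.foldl (fun acc2 j => if i == j then acc2 ++ [i] else acc2) acc) []

-- ===== PORT B =====
-- Counter lookup c[x] is ported as List.count (the count of x in the list the Counter was built from).
def unicos_em_comum_alt (seq1 : List Int) (seq2 : List Int) : List Int :=
  seq1.filter (fun x => seq1.count x == 1 && seq2.count x == 1)

-- ===== PRECONDITION & SPEC =====
def Spec_unicos_em_comum (seq1 : List Int) (seq2 : List Int) (out : List Int) : Prop := out = unicos_em_comum_alt seq1 seq2
instance (seq1 : List Int) (seq2 : List Int) (out : List Int) : Decidable (Spec_unicos_em_comum seq1 seq2 out) := by unfold Spec_unicos_em_comum; infer_instance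

-- ===== CLAIM (what is proved, stated in full; the proofs are below) =====
def Claim_equal_unicos_em_comum : Prop := ∀ (seq1 : List Int) (seq2 : List Int), Dom_unicos_em_comum seq1 seq2 → Spec_unicos_em_comum seq1 seq2 (unicos_em_comum seq1 seq2)

-- ===== LEMMAS AND PROOFS =====

-- the inner counting loop computes List.count
theorem foldl_count_eq (l : List Int) (i : Int) (c : Nat) :
    l.foldl (fun c j => if i == j then c + 1 else c) c = c + l.count i := by
  induction l generalizing c with
  | nil => simp [List.count]
  | cons a t ih =>
    simp only [List.foldl_cons, List.count_cons, ih]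
    by_cases h : i = a
    · simp [h]
      omega
    · have h' : (a == i) = false := by simp; omega
      simp [h, h']

-- the intersection inner loop appends one copy of i per occurrence of i in l
theorem foldl_inner_eq (l : List Int) (i : Int) (acc : List Int) :
    l.foldl (fun a j => if i == j then a ++ [i] else a) acc
      = acc ++ List.replicate (l.count i) i := by
  induction l generalizing acc with
  | nil => simp
  | cons a t ih =>
    simp only [List.foldl_cons, List.count_cons, ih]
    by_cases h : i = a
    · have : (a == i) = true := by simp [h]
      simp [h, List.replicate_succ, List.append_assoc]
    · have h' : (a == i) = false := by simp; omega
      simp [h, h']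

-- count of x in a filtered list
theorem count_filter_eq (l : List Int) (p : Int → Bool) (x : Int) :
    (l.filter p).count x = if p x then l.count x else 0 := by
  induction l with
  | nil => simp
  | cons a t ih =>
    by_cases h : x = a
    · subst h
      by_cases hp : p x <;> simp [List.filter_cons, hp, List.count_cons, ih]
    · have h' : (a == x) = false := by simp; omega
      by_cases hp : p a <;> simp [List.filter_cons, hp, List.count_cons, h', ih]

theorem flatMap_if_eq_filter (l : List Int) (p : Int → Bool) :
    l.flatMap (fun i => if p i then [i] else []) = l.filter p := by
  induction l with
  | nil => simp
  | cons a t ih =>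
    by_cases h : p a <;> simp [List.flatMap_cons, h, ih]

theorem unicos_em_comum_eq (seq1 seq2 : List Int) :
    unicos_em_comum seq1 seq2 = unicos_em_comum_alt seq1 seq2 := by
  unfold unicos_em_comum unicos_em_comum_alt
  have hphase : ∀ (s : List Int),
      s.foldl (fun acc i =>
        let comum := s.foldl (fun c j => if i == j then c + 1 else c) (0 : Nat)
        if comum == 1 then acc ++ [i] else acc) []
      = s.filter (fun i => s.count i == 1) := by
    intro s
    rw [PySem.List.foldl_append_if_eq_filter
      (p := fun i => s.foldl (fun c j => if i == j then c + 1 else c) (0 : Nat) == 1)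
      (l := s) (acc := [])]
    rw [List.nil_append]
    apply List.filter_congr
    intro x _
    rw [foldl_count_eq]
    simp
  rw [hphase seq1, hphase seq2]
  show (seq1.filter (fun i => seq1.count i == 1)).foldl
      (fun acc i => (seq2.filter (fun i => seq2.count i == 1)).foldl
        (fun acc2 j => if i == j then acc2 ++ [i] else acc2) acc) []
    = seq1.filter (fun x => seq1.count x == 1 && seq2.count x == 1)
  set c2 := seq2.filter (fun i => seq2.count i == 1) with hc2def
  have hfun : (fun (acc : List Int) (i : Int) =>
      c2.foldl (fun acc2 j => if i == j then acc2 ++ [i] else acc2) acc)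
      = (fun acc i => acc ++ List.replicate (c2.count i) i) := by
    funext acc i
    exact foldl_inner_eq c2 i acc
  rw [hfun, PySem.List.foldl_append_eq_flatMap, List.nil_append]
  have hg : (fun i => List.replicate (c2.count i) i)
      = (fun i => if (fun x => seq2.count x == 1) i then [i] else []) := by
    funext i
    rw [hc2def, count_filter_eq]
    by_cases h : seq2.count i = 1
    · simp [h]
    · simp [h]
  rw [hg, flatMap_if_eq_filter, List.filter_filter]
  apply List.filter_congr
  intro x _
  simp [Bool.and_comm]

-- ===== VERDICT (by name: the statement is the Claim_ definition above) =====
theorem unicos_em_comum_spec : Claim_equal_unicos_em_comum := by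
  intro seq1 seq2 _
  exact unicos_em_comum_eq seq1 seq2
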